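-- pv_equiv track=rewrite | github.com/JulienEsbt/Introduction-To-Computer-Security-Pr-ELTE-2023-2024-origin | Assignment week 5/main.py | encrypt_xor_with_changing_key_by_prev_cipher_longer_key
-- ===== SOURCE A (Python) =====
-- def encrypt_xor_with_changing_key_by_prev_cipher(text, key, mode):
--     if mode == 'encrypt':
--         encrypted_text = ""
--
--         for char in text:
--             # Encrypt the character by xoring with the key
--             encrypted_char = (ord(char) ^ key)
--
--             # Append the encrypted character to the result
--             encrypted_text += chr(encrypted_char)
--             key = encrypted_char
--
--         return encrypted_text
--
--     elif mode == 'decrypt':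
--         decrypted_text = ""
--         for char in text:
--             # Decrypt the character by xoring with the key
--             decrypted_char = (ord(char) ^ key)
--
--             # Append the decrypted character to the result
--             decrypted_text += chr(decrypted_char)
--             key = ord(char)
--
--         return decrypted_text
--
--     else:
--         raise ValueError("Invalid mode. Use 'encrypt' or 'decrypt'.")
--
-- def encrypt_xor_with_changing_key_by_prev_cipher_longer_key(text, key_list, mode):
--     if len(key_list) != 4:
--         raise ValueError("The key list must have 4 elements.")
--
--     chunk_size = len(key_list)
--     chunks = [text[i::chunk_size] for i in range(chunk_size)]
--     encrypted_chunks = []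
--
--     for i in range(chunk_size):
--         chunk_key = key_list[i]
--
--         # Apply the previous encryption scheme on each chunk
--         encrypted_chunk = encrypt_xor_with_changing_key_by_prev_cipher(chunks[i], chunk_key, mode)
--         encrypted_chunks.append(encrypted_chunk)
--
--     # Determine the maximum length among the encrypted chunks
--     max_length = max(len(chunk) for chunk in encrypted_chunks)
--
--     # Pad the encrypted chunks to match the maximum length
--     padded_chunks = [chunk.ljust(max_length, '\x00') for chunk in encrypted_chunks]
--
--     # Combine the encrypted chunks
--     combined_text = ''.join([''.join(chunk) for chunk in zip(*padded_chunks)])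
--
--     # Trim any padding null characters from the end
--     combined_text = combined_text.rstrip('\x00')
--
--     return combined_text
-- ===== SOURCE B (Python) =====
-- def encrypt_xor_with_changing_key_by_prev_cipher_longer_key(text, key_list, mode):
--     # Single pass over the text with a rotating 4-key state instead of
--     # split-into-4-chunks / encrypt each / pad / re-interleave / trim.
--     if len(key_list) != 4:
--         raise ValueError("The key list must have 4 elements.")
--     if mode not in ('encrypt', 'decrypt'):
--         raise ValueError("Invalid mode. Use 'encrypt' or 'decrypt'.")
--     k0, k1, k2, k3 = key_list
--     out = []
--     for ch in text:
--         c = ord(ch) ^ k0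
--         out.append(chr(c))
--         k0, k1, k2, k3 = k1, k2, k3, (c if mode == 'encrypt' else ord(ch))
--     return ''.join(out).rstrip('\x00')
-- ===== Notes on version B (the rewrite author's own statement) =====
-- stated objective: simpler
-- what changed: B replaces A's split-into-4-interleaved-chunks / per-chunk feedback cipher / pad / zip-reinterleave / trim pipeline by a single left-to-right pass over the text with a rotating 4-key state (key at residue i%4 used and updated with the feedback value), followed by the same rstrip of trailing NULs.
-- outside the precondition, e.g. on encrypt_xor_with_changing_key_by_prev_cipher_longer_key('', [-1, 2, 3, 4], 'encrypt'): A returns '', B returns ''; on encrypt_xor_with_changing_key_by_prev_cipher_longer_key('', [55296, 0, 0, 0], 'encrypt'): A returns '', B returns ''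
import Mathlib
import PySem

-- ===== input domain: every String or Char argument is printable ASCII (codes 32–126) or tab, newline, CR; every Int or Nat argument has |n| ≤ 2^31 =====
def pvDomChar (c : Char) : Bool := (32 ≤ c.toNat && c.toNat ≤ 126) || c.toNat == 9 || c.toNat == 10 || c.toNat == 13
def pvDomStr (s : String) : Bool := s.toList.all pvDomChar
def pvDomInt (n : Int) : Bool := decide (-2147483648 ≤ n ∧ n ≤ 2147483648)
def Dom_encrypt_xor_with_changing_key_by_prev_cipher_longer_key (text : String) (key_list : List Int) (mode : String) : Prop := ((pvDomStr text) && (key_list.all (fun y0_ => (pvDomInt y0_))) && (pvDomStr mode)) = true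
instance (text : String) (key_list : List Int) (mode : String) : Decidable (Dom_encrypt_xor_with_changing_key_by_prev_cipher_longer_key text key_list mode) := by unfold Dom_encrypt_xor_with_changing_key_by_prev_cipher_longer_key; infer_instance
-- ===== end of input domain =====

-- B is a single left-to-right pass with a rotating 4-key state instead of A's
-- split-into-4-chunks / encrypt each chunk / pad / re-interleave / trim pipeline (objective: simpler).

-- ===== PORT A =====
-- encrypt branch of encrypt_xor_with_changing_key_by_prev_cipher: feedback key = previous cipher value
def pvAEnc : Int → List Char → List Char
  | _, [] => []
  | key, c :: t =>
      let e := PySem.Int.bxor ((c.toNat : Int)) key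
      Char.ofNat e.toNat :: pvAEnc e t

-- decrypt branch: feedback key = previous plaintext (input) character code
def pvADec : Int → List Char → List Char
  | _, [] => []
  | key, c :: t =>
      let e := PySem.Int.bxor ((c.toNat : Int)) key
      Char.ofNat e.toNat :: pvADec ((c.toNat : Int)) t

-- encrypt_xor_with_changing_key_by_prev_cipher; the invalid-mode branch raises ValueError in Python (outside Pre_)
def pvACipher (cs : List Char) (key : Int) (mode : String) : List Char :=
  if mode = "encrypt" then pvAEnc key cs
  else if mode = "decrypt" then pvADec key cs
  else []

-- text[i::4] applied to (text dropped i): take one char, skip 3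
def pvAEvery4 : List Char → List Char
  | [] => []
  | c :: t => c :: pvAEvery4 (t.drop 3)
termination_by l => l.length
decreasing_by simp

def pvNul : Char := Char.ofNat 0

-- chunk.ljust(maxLen, '\x00')
def pvLjust (cs : List Char) (n : Nat) : List Char := cs ++ List.replicate (n - cs.length) pvNul

-- zip(*padded_chunks) for the 4 equal-length rows A always has (key_list has 4 elements)
def pvZipCols : List Char → List Char → List Char → List Char → List (List Char)
  | a :: as, b :: bs, c :: cs, d :: ds => [a, b, c, d] :: pvZipCols as bs cs ds
  | _, _, _, _ => []

-- s.rstrip('\x00'): exact port — strips exactly the trailing '\x00' characters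
def pvRstripNul (cs : List Char) : List Char := (cs.reverse.dropWhile (· == pvNul)).reverse

def encrypt_xor_with_changing_key_by_prev_cipher_longer_key (text : String) (key_list : List Int) (mode : String) : String :=
  if key_list.length ≠ 4 then ""  -- Python raises ValueError here (outside Pre_)
  else
    let cs := text.toList
    let chunks := (List.range 4).map (fun i => pvAEvery4 (cs.drop i))
    let encChunks := (List.range 4).map (fun i => pvACipher (chunks.getD i []) (key_list.getD i 0) mode)
    let maxLen := (encChunks.map List.length).foldl max 0
    let padded := encChunks.map (fun c => pvLjust c maxLen)
    let combined :=
      match padded with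
      | [p0, p1, p2, p3] => (pvZipCols p0 p1 p2 p3).flatten
      | _ => []
    String.ofList (pvRstripNul combined)

-- ===== PORT B =====
def pvBNul : Char := Char.ofNat 0

-- Source B's ''.join(out).rstrip('\x00'): exact — strips exactly the trailing '\x00' characters
def pvBRstripNul (cs : List Char) : List Char := (cs.reverse.dropWhile (· == pvBNul)).reverse

-- single pass, rotating key state (k0 used, feedback value appended at the back)
def pvBLoop (mode : String) : List Char → Int → Int → Int → Int → List Char
  | [], _, _, _, _ => []
  | ch :: t, k0, k1, k2, k3 =>
      let c := PySem.Int.bxor ((ch.toNat : Int)) k0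
      Char.ofNat c.toNat :: pvBLoop mode t k1 k2 k3 (if mode = "encrypt" then c else (ch.toNat : Int))

def encrypt_xor_with_changing_key_by_prev_cipher_longer_key_alt (text : String) (key_list : List Int) (mode : String) : String :=
  if key_list.length ≠ 4 then ""  -- ValueError in Source B (outside Pre_)
  else if ¬ (mode = "encrypt" ∨ mode = "decrypt") then ""  -- ValueError in Source B (outside Pre_)
  else
    -- k0, k1, k2, k3 = key_list  (the guard above makes the 4-way unpack exact)
    String.ofList (pvBRstripNul (pvBLoop mode text.toList
      (key_list.getD 0 0) (key_list.getD 1 0) (key_list.getD 2 0) (key_list.getD 3 0)))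

-- ===== PRECONDITION & SPEC =====
-- Pre_ requires: 4 keys, a valid mode (otherwise Python raises ValueError), and keys in 0..0x10FFFF
-- outside the surrogate block 0xD800..0xDFFF.  Since every admitted text character is < 128, the
-- rolling key's bits ≥ 7 never change within a chunk, so a negative key or a key > 0x10FFFF makes
-- Python's chr() raise ValueError at the chunk's first character (A returns only on empty chunks
-- there, where B also returns the same value — see claim.json cites), and a key in the surrogate
-- block makes A return a Python str containing lone surrogates, which is not a value of the Lean
-- String type (not a sequence of Unicode scalar values) and cannot be ported; B returns the same
-- Python string there.
def Pre_encrypt_xor_with_changing_key_by_prev_cipher_longer_key (text : String) (key_list : List Int) (mode : String) : Prop :=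
  key_list.length = 4 ∧ (mode = "encrypt" ∨ mode = "decrypt") ∧
    ∀ k ∈ key_list, 0 ≤ k ∧ k ≤ 1114111 ∧ ¬ (55296 ≤ k ∧ k ≤ 57343)
instance (text : String) (key_list : List Int) (mode : String) : Decidable (Pre_encrypt_xor_with_changing_key_by_prev_cipher_longer_key text key_list mode) := by unfold Pre_encrypt_xor_with_changing_key_by_prev_cipher_longer_key; infer_instance

def pvWitness_encrypt_xor_with_changing_key_by_prev_cipher_longer_key : String × List Int × String := ("Hello!", [1, 2, 300, 70000], "encrypt")

def Spec_encrypt_xor_with_changing_key_by_prev_cipher_longer_key (text : String) (key_list : List Int) (mode : String) (out : String) : Prop := out = encrypt_xor_with_changing_key_by_prev_cipher_longer_key_alt text key_list mode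
instance (text : String) (key_list : List Int) (mode : String) (out : String) : Decidable (Spec_encrypt_xor_with_changing_key_by_prev_cipher_longer_key text key_list mode out) := by unfold Spec_encrypt_xor_with_changing_key_by_prev_cipher_longer_key; infer_instance

-- ===== CLAIM (what is proved, stated in full; the proofs are below) =====
def Claim_equal_encrypt_xor_with_changing_key_by_prev_cipher_longer_key : Prop := ∀ (text : String) (key_list : List Int) (mode : String), Dom_encrypt_xor_with_changing_key_by_prev_cipher_longer_key text key_list mode → Pre_encrypt_xor_with_changing_key_by_prev_cipher_longer_key text key_list mode → Spec_encrypt_xor_with_changing_key_by_prev_cipher_longer_key text key_list mode (encrypt_xor_with_changing_key_by_prev_cipher_longer_key text key_list mode)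

-- ===== LEMMAS AND PROOFS =====

-- the two rstrip('\x00') transcriptions are definitionally equal
lemma pvBRstripNul_eq (cs : List Char) : pvBRstripNul cs = pvRstripNul cs := rfl

-- round-robin interleaving (proof device): take the head of the first list, rotate
def pvInter : List Char → List Char → List Char → List Char → List Char
  | [], _, _, _ => []
  | a :: as, bs, cs, ds => a :: pvInter bs cs ds as
termination_by a b c d => a.length + b.length + c.length + d.length

lemma pvAEnc_length (l : List Char) : ∀ k, (pvAEnc k l).length = l.length := by
  induction l with
  | nil => intro k; simp [pvAEnc]
  | cons c t ih => intro k; simp [pvAEnc, ih]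

lemma pvADec_length (l : List Char) : ∀ k, (pvADec k l).length = l.length := by
  induction l with
  | nil => intro k; simp [pvADec]
  | cons c t ih => intro k; simp [pvADec, ih]

-- length chain of the four interleaved chunks
lemma pvChain : ∀ (l : List Char),
    (pvAEvery4 (l.drop 1)).length ≤ (pvAEvery4 l).length ∧
    (pvAEvery4 (l.drop 2)).length ≤ (pvAEvery4 (l.drop 1)).length ∧
    (pvAEvery4 (l.drop 3)).length ≤ (pvAEvery4 (l.drop 2)).length ∧
    (pvAEvery4 l).length ≤ (pvAEvery4 (l.drop 3)).length + 1
  | [] => by simp [pvAEvery4]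
  | c :: t => by
      have h := pvChain t
      rw [pvAEvery4]
      simp only [List.drop_succ_cons, List.drop_zero, List.length_cons] at *
      obtain ⟨h1, h2, h3, h4⟩ := h
      refine ⟨?_, ?_, ?_, ?_⟩ <;> omega
termination_by l => l.length
decreasing_by simp

lemma pvLjust_cons (x : Char) (xs : List Char) (n : Nat) :
    pvLjust (x :: xs) (n + 1) = x :: pvLjust xs n := by
  simp [pvLjust, Nat.succ_sub_succ]

-- padded-zip-join equals round-robin interleaving plus trailing padding
lemma pvPad : ∀ (e0 e1 e2 e3 : List Char),
    e1.length ≤ e0.length → e2.length ≤ e1.length → e3.length ≤ e2.length → e0.length ≤ e3.length + 1 →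
    (pvZipCols (pvLjust e0 e0.length) (pvLjust e1 e0.length) (pvLjust e2 e0.length) (pvLjust e3 e0.length)).flatten
      = pvInter e0 e1 e2 e3 ++ List.replicate (4 * e0.length - (e0.length + e1.length + e2.length + e3.length)) pvNul
  | [], e1, e2, e3 => by
      intro h1 h2 h3 _
      simp only [List.length_nil, Nat.le_zero, List.length_eq_zero_iff] at h1
      subst h1
      simp only [List.length_nil, Nat.le_zero, List.length_eq_zero_iff] at h2
      subst h2
      simp only [List.length_nil, Nat.le_zero, List.length_eq_zero_iff] at h3
      subst h3
      simp [pvLjust, pvZipCols, pvInter]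
  | a :: as, [], e2, e3 => by
      intro h1 h2 h3 h4
      have he2 : e2 = [] := by rw [← List.length_eq_zero_iff]; simp at h2 ⊢; omega
      have he3 : e3 = [] := by subst he2; rw [← List.length_eq_zero_iff]; simp at h3 ⊢; omega
      subst he2; subst he3
      have has : as = [] := by rw [← List.length_eq_zero_iff]; simp at h4 ⊢; omega
      subst has
      simp [pvLjust, pvZipCols, pvInter, List.replicate]
  | a :: as, b :: bs, [], e3 => by
      intro h1 h2 h3 h4
      have he3 : e3 = [] := by rw [← List.length_eq_zero_iff]; simp at h3 ⊢; omega
      subst he3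
      have has : as = [] := by rw [← List.length_eq_zero_iff]; simp at h4 ⊢; omega
      subst has
      have hbs : bs = [] := by rw [← List.length_eq_zero_iff]; simp at h1 ⊢; omega
      subst hbs
      simp [pvLjust, pvZipCols, pvInter, List.replicate]
  | a :: as, b :: bs, c :: cs, [] => by
      intro h1 h2 h3 h4
      have has : as = [] := by rw [← List.length_eq_zero_iff]; simp at h4 ⊢; omega
      subst has
      have hbs : bs = [] := by rw [← List.length_eq_zero_iff]; simp at h1 ⊢; omega
      subst hbs
      have hcs : cs = [] := by rw [← List.length_eq_zero_iff]; simp at h2 ⊢; omega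
      subst hcs
      simp [pvLjust, pvZipCols, pvInter]
  | a :: as, b :: bs, c :: cs, d :: ds => by
      intro h1 h2 h3 h4
      simp only [List.length_cons] at h1 h2 h3 h4 ⊢
      rw [pvLjust_cons, pvLjust_cons, pvLjust_cons, pvLjust_cons, pvZipCols]
      have hIH := pvPad as bs cs ds (by omega) (by omega) (by omega) (by omega)
      have hInter : pvInter (a :: as) (b :: bs) (c :: cs) (d :: ds)
          = a :: b :: c :: d :: pvInter as bs cs ds := by
        simp [pvInter]
      rw [List.flatten_cons, hIH, hInter]
      have hk : 4 * (as.length + 1) - (as.length + 1 + (bs.length + 1) + (cs.length + 1) + (ds.length + 1))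
          = 4 * as.length - (as.length + bs.length + cs.length + ds.length) := by omega
      simp [hk]
termination_by e0 _ _ _ => e0.length

-- trailing '\x00' padding is invisible to rstrip('\x00')
lemma pvRstripNul_append_replicate (x : List Char) (k : Nat) :
    pvRstripNul (x ++ List.replicate k pvNul) = pvRstripNul x := by
  unfold pvRstripNul
  rw [List.reverse_append, List.reverse_replicate]
  congr 1
  induction k with
  | zero => simp
  | succ n ih => simpa [List.replicate_succ] using ih

-- B's single pass is the round-robin interleaving of A's four encrypted chunks
lemma pvInterEnc : ∀ (l : List Char) (k0 k1 k2 k3 : Int),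
    pvBLoop "encrypt" l k0 k1 k2 k3 =
      pvInter (pvAEnc k0 (pvAEvery4 l)) (pvAEnc k1 (pvAEvery4 (l.drop 1)))
              (pvAEnc k2 (pvAEvery4 (l.drop 2))) (pvAEnc k3 (pvAEvery4 (l.drop 3)))
  | [], k0, k1, k2, k3 => by simp [pvBLoop, pvAEvery4, pvAEnc, pvInter]
  | ch :: t, k0, k1, k2, k3 => by
      rw [pvAEvery4]
      simp only [pvBLoop, pvAEnc, List.drop_succ_cons, List.drop_zero]
      rw [pvInterEnc t k1 k2 k3 _]
      simp [pvInter]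

lemma pvInterDec : ∀ (l : List Char) (k0 k1 k2 k3 : Int),
    pvBLoop "decrypt" l k0 k1 k2 k3 =
      pvInter (pvADec k0 (pvAEvery4 l)) (pvADec k1 (pvAEvery4 (l.drop 1)))
              (pvADec k2 (pvAEvery4 (l.drop 2))) (pvADec k3 (pvAEvery4 (l.drop 3)))
  | [], k0, k1, k2, k3 => by simp [pvBLoop, pvAEvery4, pvADec, pvInter]
  | ch :: t, k0, k1, k2, k3 => by
      rw [pvAEvery4]
      simp only [pvBLoop, pvADec, List.drop_succ_cons, List.drop_zero]
      rw [if_neg (by decide), pvInterDec t k1 k2 k3 _]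
      simp [pvInter]

-- common final step: padded-zip-join + rstrip collapses to interleave + rstrip
lemma pvMainGen (e0 e1 e2 e3 : List Char)
    (h1 : e1.length ≤ e0.length) (h2 : e2.length ≤ e1.length)
    (h3 : e3.length ≤ e2.length) (h4 : e0.length ≤ e3.length + 1)
    (M : Nat) (hM : M = e0.length) :
    pvRstripNul ((pvZipCols (pvLjust e0 M) (pvLjust e1 M) (pvLjust e2 M) (pvLjust e3 M)).flatten)
      = pvRstripNul (pvInter e0 e1 e2 e3) := by
  subst hM
  rw [pvPad e0 e1 e2 e3 h1 h2 h3 h4, pvRstripNul_append_replicate]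

-- ===== VERDICT (by name: the statement is the Claim_ definition above) =====
set_option maxHeartbeats 1000000 in
theorem encrypt_xor_with_changing_key_by_prev_cipher_longer_key_spec : Claim_equal_encrypt_xor_with_changing_key_by_prev_cipher_longer_key := by
  intro text key_list mode _hdom hpre
  obtain ⟨h4, hmode, _hk⟩ := hpre
  unfold Spec_encrypt_xor_with_changing_key_by_prev_cipher_longer_key
  rcases key_list with _ | ⟨k0, _ | ⟨k1, _ | ⟨k2, _ | ⟨k3, _ | ⟨k4, rest⟩⟩⟩⟩⟩ <;>
    simp only [List.length_cons, List.length_nil] at h4 <;> try omega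
  unfold encrypt_xor_with_changing_key_by_prev_cipher_longer_key
    encrypt_xor_with_changing_key_by_prev_cipher_longer_key_alt
  have hrange : List.range 4 = [0, 1, 2, 3] := by decide
  obtain ⟨hc1, hc2, hc3, hc4⟩ := pvChain text.toList
  rcases hmode with hm | hm
  · subst hm
    simp only [hrange]
    simp [pvACipher]
    rw [← List.drop_one]
    congr 1
    rw [pvBRstripNul_eq, pvInterEnc text.toList k0 k1 k2 k3]
    exact pvMainGen _ _ _ _
      (by rw [pvAEnc_length, pvAEnc_length]; exact hc1)
      (by rw [pvAEnc_length, pvAEnc_length]; exact hc2)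
      (by rw [pvAEnc_length, pvAEnc_length]; exact hc3)
      (by rw [pvAEnc_length, pvAEnc_length]; exact hc4)
      _ (by simp only [pvAEnc_length]; omega)
  · subst hm
    simp only [hrange]
    simp [pvACipher]
    rw [← List.drop_one]
    congr 1
    rw [pvBRstripNul_eq, pvInterDec text.toList k0 k1 k2 k3]
    exact pvMainGen _ _ _ _
      (by rw [pvADec_length, pvADec_length]; exact hc1)
      (by rw [pvADec_length, pvADec_length]; exact hc2)
      (by rw [pvADec_length, pvADec_length]; exact hc3)
      (by rw [pvADec_length, pvADec_length]; exact hc4)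
      _ (by simp only [pvADec_length]; omega)
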